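-- pv_equiv track=rewrite | github.com/pypi-data/pypi-mirror-383 | packages/plado/plado-0.1.6.tar.gz/plado-0.1.6/plado/datalog/evaluator/compiler.py | are_disjoint
-- ===== SOURCE A (Python) =====
-- def are_disjoint(args0: tuple[int], args1: tuple[int]):
--     s0 = sorted(args0)
--     s1 = sorted(args1)
--     i, j = 0, 0
--     while i < len(s0) and j < len(s1):
--         if s0[i] < s1[j]:
--             i += 1
--         elif s0[i] == s1[j]:
--             return False
--         else:
--             j += 1
--     return True
-- ===== SOURCE B (Python) =====
-- def are_disjoint(args0: tuple[int], args1: tuple[int]):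
--     return not any(a in args1 for a in args0)
-- ===== Notes on version B (the rewrite author's own statement) =====
-- stated objective: idiomatic
-- what changed: Replaces the sort-then-two-pointer merge with a direct membership scan: not any(a in args1 for a in args0), maintaining no sorted copies or indices.
import Mathlib
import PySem

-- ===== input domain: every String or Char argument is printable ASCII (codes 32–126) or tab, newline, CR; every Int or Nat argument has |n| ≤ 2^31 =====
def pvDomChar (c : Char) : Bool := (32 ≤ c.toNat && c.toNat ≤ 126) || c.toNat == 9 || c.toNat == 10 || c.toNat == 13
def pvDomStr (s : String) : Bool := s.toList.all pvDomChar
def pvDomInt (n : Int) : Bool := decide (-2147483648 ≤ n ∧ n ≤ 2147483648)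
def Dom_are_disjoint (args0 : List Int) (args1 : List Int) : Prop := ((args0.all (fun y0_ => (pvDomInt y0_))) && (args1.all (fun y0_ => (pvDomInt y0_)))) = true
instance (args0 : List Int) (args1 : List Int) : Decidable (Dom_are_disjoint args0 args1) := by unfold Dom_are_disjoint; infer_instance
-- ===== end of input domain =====

-- B replaces A's sort-then-two-pointer merge by a direct membership scan (not any(a in args1 for a in args0)); objective: idiomatic.


-- ===== PORT A =====
-- the while loop: two pointers over the sorted lists (advancing i / j = consuming the head)
def are_disjoint_loop : List Int → List Int → Bool
  | a :: as, b :: bs =>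
      if a < b then are_disjoint_loop as (b :: bs)
      else if a == b then false
      else are_disjoint_loop (a :: as) bs
  | _, _ => true

def are_disjoint (args0 : List Int) (args1 : List Int) : Bool :=
  let s0 := PySem.List.sorted args0 (fun x => x) false
  let s1 := PySem.List.sorted args1 (fun x => x) false
  are_disjoint_loop s0 s1

-- ===== PORT B =====
def are_disjoint_alt (args0 : List Int) (args1 : List Int) : Bool :=
  !(args0.any (fun a => args1.contains a))

-- ===== PRECONDITION & SPEC =====
def Spec_are_disjoint (args0 : List Int) (args1 : List Int) (out : Bool) : Prop := out = are_disjoint_alt args0 args1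
instance (args0 : List Int) (args1 : List Int) (out : Bool) : Decidable (Spec_are_disjoint args0 args1 out) := by unfold Spec_are_disjoint; infer_instance

-- ===== CLAIM (what is proved, stated in full; the proofs are below) =====
def Claim_equal_are_disjoint : Prop := ∀ (args0 : List Int) (args1 : List Int), Dom_are_disjoint args0 args1 → Spec_are_disjoint args0 args1 (are_disjoint args0 args1)

-- ===== LEMMAS AND PROOFS =====

-- on sorted inputs the two-pointer loop decides exactly "no common element"
theorem are_disjoint_loop_iff (l1 l2 : List Int)
    (h1 : l1.Pairwise (· ≤ ·)) (h2 : l2.Pairwise (· ≤ ·)) :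
    are_disjoint_loop l1 l2 = !(l1.any (fun a => l2.contains a)) := by
  induction l1 generalizing l2 with
  | nil => simp [are_disjoint_loop]
  | cons a as ih =>
    induction l2 with
    | nil => simp [are_disjoint_loop]
    | cons b bs ih2 =>
      rcases List.pairwise_cons.mp h1 with ⟨ha, has⟩
      rcases List.pairwise_cons.mp h2 with ⟨hb, hbs⟩
      by_cases hlt : a < b
      · -- a is below every element of b :: bs, so a contributes nothing
        rw [are_disjoint_loop, if_pos hlt, ih (b :: bs) has h2]
        have hnot : (b :: bs).contains a = false := by
          simp only [List.contains_eq_mem, decide_eq_false_iff_not, List.mem_cons, not_or]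
          refine ⟨fun h => absurd hlt (by omega), fun hmem => absurd (hb a hmem) (by omega)⟩
        simp only [List.any_cons, hnot, Bool.false_or]
      · by_cases heq : a = b
        · subst heq
          rw [are_disjoint_loop, if_neg hlt, if_pos (by simp)]
          simp [List.any_cons]
        · have hgt : b < a := lt_of_le_of_ne (not_lt.mp hlt) (Ne.symm heq)
          rw [are_disjoint_loop, if_neg hlt, if_neg (by simp [heq]), ih2 hbs]
          -- b is below every element of a :: as, so b contributes nothing on the right
          congr 1
          rw [Bool.eq_iff_iff]
          simp only [List.any_eq_true, List.contains_eq_mem, decide_eq_true_eq]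
          constructor
          · rintro ⟨x, hx, hm⟩
            exact ⟨x, hx, List.mem_cons_of_mem _ hm⟩
          · rintro ⟨x, hx, hm⟩
            rcases List.mem_cons.mp hm with rfl | hm'
            · rcases List.mem_cons.mp hx with rfl | hmem
              · omega
              · exact absurd (ha x hmem) (by omega)
            · exact ⟨x, hx, hm'⟩

theorem are_disjoint_spec : Claim_equal_are_disjoint := by
  intro args0 args1 _
  unfold Spec_are_disjoint are_disjoint are_disjoint_alt
  rw [are_disjoint_loop_iff _ _ (PySem.List.sorted_pairwise args0 (fun x => x)) (PySem.List.sorted_pairwise args1 (fun x => x))]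
  congr 1
  rw [Bool.eq_iff_iff]
  simp [List.any_eq_true, List.contains_eq_mem, PySem.List.mem_sorted]
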